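-- pv_equiv track=rewrite | github.com/tkuester/klonor-kicad | kipy/parsesch/graphics/find_collisions.py | group_items
-- ===== SOURCE A (Python) =====
-- def group_items(mylist, startindex, stopindex):
--     ''' Yields sorted lists of items which start at the same location
--         Typically startindex and stopindex will be 0 and 2 (for x dimension)
--         or 1 and 3 (for y dimension)
--     '''
--     if not mylist:
--         return
--     mylist = sorted(mylist, key = lambda obj:(obj[startindex], obj[stopindex], obj))
--     result = []
--     prev_x = mylist[0][startindex]
--     for obj in mylist:
--         if obj[startindex] != prev_x:
--             yield result
--             result = []
--         result.append(obj)
--         prev_x = obj[startindex]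
--     yield result
-- ===== SOURCE B (Python) =====
-- def group_items(mylist, startindex, stopindex):
--     ''' Yields sorted lists of items which start at the same location
--         Typically startindex and stopindex will be 0 and 2 (for x dimension)
--         or 1 and 3 (for y dimension)
--     '''
--     buckets = {}
--     for obj in mylist:
--         buckets.setdefault(obj[startindex], []).append(obj)
--     for key in sorted(buckets):
--         yield sorted(buckets[key], key=lambda o: (o[stopindex], o))
-- ===== Notes on version B (the rewrite author's own statement) =====
-- stated objective: alternative
-- what changed: Replaces A's single global sort by a 3-part key followed by a prev_x run-detection scan with a dict of buckets keyed by the start coordinate, then iterating the keys in sorted order and sorting each bucket by (stop, obj).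
import Mathlib
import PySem

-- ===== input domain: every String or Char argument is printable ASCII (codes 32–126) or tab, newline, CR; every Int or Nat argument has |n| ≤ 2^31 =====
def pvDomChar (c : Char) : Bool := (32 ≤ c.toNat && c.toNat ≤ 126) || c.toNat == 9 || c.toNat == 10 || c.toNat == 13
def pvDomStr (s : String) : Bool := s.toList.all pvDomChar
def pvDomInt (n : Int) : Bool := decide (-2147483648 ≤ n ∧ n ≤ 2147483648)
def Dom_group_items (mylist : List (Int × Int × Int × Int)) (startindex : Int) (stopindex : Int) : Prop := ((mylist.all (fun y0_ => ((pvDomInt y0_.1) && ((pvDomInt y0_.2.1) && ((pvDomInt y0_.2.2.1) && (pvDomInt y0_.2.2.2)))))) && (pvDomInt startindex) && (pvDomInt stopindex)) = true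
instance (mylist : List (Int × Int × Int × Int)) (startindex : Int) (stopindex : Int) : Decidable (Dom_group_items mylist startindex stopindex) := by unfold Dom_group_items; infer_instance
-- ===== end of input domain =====

-- B groups items with a dict of buckets keyed by the start coordinate (sorted keys, each bucket
-- sorted by (stop, obj)) instead of A's global 3-key sort followed by a prev_x run scan; alternative
-- decomposition, same asymptotic cost. Equivalence is about return values (neither mutates its argument).


-- ===== PORT A =====
-- obj[i] for a 4-tuple obj, Python index semantics (negative wraps); indices outside -4..3
-- raise IndexError in Python and are excluded by Pre_ (the value here is junk for those).
def tget (t : Int × Int × Int × Int) (i : Int) : Int :=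
  if i = 0 ∨ i = -4 then t.1
  else if i = 1 ∨ i = -3 then t.2.1
  else if i = 2 ∨ i = -2 then t.2.2.1
  else t.2.2.2

-- Python tuple comparison is lexicographic: encode the tuple keys with Lex products.
def oKey (o : Int × Int × Int × Int) : Lex (Int × Lex (Int × Lex (Int × Int))) :=
  toLex (o.1, toLex (o.2.1, toLex (o.2.2.1, o.2.2.2)))

-- key=lambda o: (o[stopindex], o)
def key2 (e : Int) (o : Int × Int × Int × Int) : Lex (Int × Lex (Int × Lex (Int × Lex (Int × Int)))) :=
  toLex (tget o e, oKey o)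

-- key=lambda o: (o[startindex], o[stopindex], o)
def key3 (s e : Int) (o : Int × Int × Int × Int) :
    Lex (Int × Lex (Int × Lex (Int × Lex (Int × Lex (Int × Int))))) :=
  toLex (tget o s, key2 e o)

def group_items (mylist : List (Int × Int × Int × Int)) (startindex : Int) (stopindex : Int) : List (List (Int × Int × Int × Int)) :=
  if mylist = [] then []
  else
    let ml := PySem.List.sorted mylist (fun o => key3 startindex stopindex o) false
    match ml with
    | [] => []
    | h :: _ =>
      let fin := ml.foldl
        (fun (st : List (Int × Int × Int × Int) × Int × List (List (Int × Int × Int × Int))) obj =>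
          if tget obj startindex ≠ st.2.1 then ([obj], tget obj startindex, st.2.2 ++ [st.1])
          else (st.1 ++ [obj], tget obj startindex, st.2.2))
        ([], tget h startindex, [])
      fin.2.2 ++ [fin.1]

-- ===== PORT B =====
def group_items_alt (mylist : List (Int × Int × Int × Int)) (startindex : Int) (stopindex : Int) : List (List (Int × Int × Int × Int)) :=
  let buckets := mylist.foldl
    (fun (d : PySem.Dict Int (List (Int × Int × Int × Int))) obj =>
      d.modify (tget obj startindex) [] (fun b => b ++ [obj]))   -- buckets.setdefault(obj[startindex], []).append(obj)
    PySem.Dict.empty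
  (PySem.List.sorted buckets.keys (fun x => x) false).map
    (fun kk => PySem.List.sorted (buckets.getD kk []) (fun o => key2 stopindex o) false)

-- ===== PRECONDITION & SPEC =====
-- On a nonempty list Python evaluates obj[startindex] / obj[stopindex]; an index outside -4..3
-- raises IndexError (in both A and B), so exactly those inputs are excluded. Empty lists never
-- index and are always admitted.
def Pre_group_items (mylist : List (Int × Int × Int × Int)) (startindex : Int) (stopindex : Int) : Prop :=
  mylist = [] ∨ ((-4 ≤ startindex ∧ startindex ≤ 3) ∧ (-4 ≤ stopindex ∧ stopindex ≤ 3))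
instance (mylist : List (Int × Int × Int × Int)) (startindex : Int) (stopindex : Int) : Decidable (Pre_group_items mylist startindex stopindex) := by unfold Pre_group_items; infer_instance

def pvWitness_group_items : (List (Int × Int × Int × Int)) × Int × Int :=
  ([(0, 0, 1, 1), (0, 2, 0, 0), (1, 0, 0, 0)], 0, 2)

def Spec_group_items (mylist : List (Int × Int × Int × Int)) (startindex : Int) (stopindex : Int) (out : List (List (Int × Int × Int × Int))) : Prop := out = group_items_alt mylist startindex stopindex
instance (mylist : List (Int × Int × Int × Int)) (startindex : Int) (stopindex : Int) (out : List (List (Int × Int × Int × Int))) : Decidable (Spec_group_items mylist startindex stopindex out) := by unfold Spec_group_items; infer_instance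

-- ===== CLAIM (what is proved, stated in full; the proofs are below) =====
def Claim_equal_group_items : Prop := ∀ (mylist : List (Int × Int × Int × Int)) (startindex : Int) (stopindex : Int), Dom_group_items mylist startindex stopindex → Pre_group_items mylist startindex stopindex → Spec_group_items mylist startindex stopindex (group_items mylist startindex stopindex)

-- ===== LEMMAS AND PROOFS =====

-- The run form of A's scan: chunkW groups maximal runs of equal start coordinate.
def chunkW (s : Int) : List (Int × Int × Int × Int) → List (List (Int × Int × Int × Int))
  | [] => []
  | h :: t =>
    (h :: t.takeWhile (fun o => tget o s == tget h s)) ::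
      chunkW s (t.dropWhile (fun o => tget o s == tget h s))
termination_by l => l.length
decreasing_by simpa using Nat.lt_succ_of_le (List.length_dropWhile_le _ _)

-- The distinct start coordinates in order of first (hence, on a sorted list, increasing) appearance.
def reps (s : Int) : List (Int × Int × Int × Int) → List Int
  | [] => []
  | h :: t => tget h s :: reps s (t.dropWhile (fun o => tget o s == tget h s))
termination_by l => l.length
decreasing_by simpa using Nat.lt_succ_of_le (List.length_dropWhile_le _ _)

abbrev PVItem : Type := Int × Int × Int × Int

lemma chunkW_nil (s : Int) : chunkW s [] = [] := by rw [chunkW]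

lemma chunkW_cons (s : Int) (h : PVItem) (t : List PVItem) :
    chunkW s (h :: t)
      = (h :: t.takeWhile (fun o => tget o s == tget h s))
        :: chunkW s (t.dropWhile (fun o => tget o s == tget h s)) := by rw [chunkW]

lemma reps_nil (s : Int) : reps s [] = [] := by rw [reps]

lemma reps_cons (s : Int) (h : PVItem) (t : List PVItem) :
    reps s (h :: t) = tget h s :: reps s (t.dropWhile (fun o => tget o s == tget h s)) := by
  rw [reps]

-- A's loop as a recursion on the remaining list (state = current run r, previous start p).
def chunk1 (s p : Int) (r : List PVItem) : List PVItem → List (List PVItem)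
  | [] => [r]
  | h :: t => if tget h s = p then chunk1 s p (r ++ [h]) t else r :: chunk1 s (tget h s) [h] t

lemma foldl_eq_chunk1 (s : Int) (l : List PVItem) : ∀ (r : List PVItem) (p : Int) (o : List (List PVItem)),
    (l.foldl (fun (st : List PVItem × Int × List (List PVItem)) obj =>
        if tget obj s ≠ st.2.1 then ([obj], tget obj s, st.2.2 ++ [st.1])
        else (st.1 ++ [obj], tget obj s, st.2.2)) (r, p, o)).2.2
      ++ [(l.foldl (fun (st : List PVItem × Int × List (List PVItem)) obj =>
        if tget obj s ≠ st.2.1 then ([obj], tget obj s, st.2.2 ++ [st.1])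
        else (st.1 ++ [obj], tget obj s, st.2.2)) (r, p, o)).1]
      = o ++ chunk1 s p r l := by
  induction l with
  | nil => intro r p o; simp [chunk1]
  | cons h t ih =>
    intro r p o
    by_cases hc : tget h s = p
    · have e1 : (if tget h s ≠ p then (([h] : List PVItem), tget h s, o ++ [r])
          else (r ++ [h], tget h s, o)) = (r ++ [h], tget h s, o) := if_neg (not_not_intro hc)
      rw [List.foldl_cons, e1]
      have e2 : chunk1 s p r (h :: t) = chunk1 s p (r ++ [h]) t := by
        simp only [chunk1]; rw [if_pos hc]
      rw [e2, ← hc]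
      exact ih (r ++ [h]) (tget h s) o
    · have e1 : (if tget h s ≠ p then (([h] : List PVItem), tget h s, o ++ [r])
          else (r ++ [h], tget h s, o)) = ([h], tget h s, o ++ [r]) := if_pos hc
      rw [List.foldl_cons, e1]
      have e2 : chunk1 s p r (h :: t) = r :: chunk1 s (tget h s) [h] t := by
        simp only [chunk1]; rw [if_neg hc]
      rw [e2, ih [h] (tget h s) (o ++ [r])]
      simp
lemma chunk1_eq_chunkW (s : Int) (l : List PVItem) : ∀ (p : Int) (r : List PVItem),
    chunk1 s p r l
      = (r ++ l.takeWhile (fun o => tget o s == p))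
        :: chunkW s (l.dropWhile (fun o => tget o s == p)) := by
  induction l with
  | nil => intro p r; simp [chunk1, chunkW]
  | cons h t ih =>
    intro p r
    rw [List.takeWhile_cons, List.dropWhile_cons]
    by_cases hc : tget h s = p
    · have hb : (tget h s == p) = true := by simp [hc]
      rw [hb]
      have e2 : chunk1 s p r (h :: t) = chunk1 s p (r ++ [h]) t := by
        simp only [chunk1]; rw [if_pos hc]
      rw [e2, ih p (r ++ [h])]
      simp
    · have hb : (tget h s == p) = false := by simp [hc]
      rw [hb]
      simp only [Bool.false_eq_true, if_false]
      have e2 : chunk1 s p r (h :: t) = r :: chunk1 s (tget h s) [h] t := by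
        simp only [chunk1]; rw [if_neg hc]
      rw [e2, ih (tget h s) [h], chunkW_cons]
      simp

-- members of the dropped tail have a strictly larger start coordinate
lemma dropWhile_gt (s : Int) (h : PVItem) (t : List PVItem)
    (hs : (h :: t).Pairwise (fun a b => tget a s ≤ tget b s)) :
    ∀ x ∈ t.dropWhile (fun o => tget o s == tget h s), tget h s < tget x s := by
  intro x hx
  set p := (fun o : PVItem => tget o s == tget h s) with hp
  cases hd : t.dropWhile p with
  | nil => rw [hd] at hx; simp at hx
  | cons d0 d1 =>
    rw [hd] at hx
    have hsub : (d0 :: d1).Sublist t := by rw [← hd]; exact List.dropWhile_sublist p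
    have hd0t : d0 ∈ t := hsub.mem (List.mem_cons_self)
    have hle0 : tget h s ≤ tget d0 s := (List.pairwise_cons.mp hs).1 d0 hd0t
    have hne0 : tget d0 s ≠ tget h s := by
      have h1 := List.head_dropWhile_not p (l := t) (w := by rw [hd]; simp)
      simp only [hd, List.head_cons] at h1
      simpa [hp] using h1
    have hlt0 : tget h s < tget d0 s := lt_of_le_of_ne hle0 (fun heq => hne0 heq.symm)
    rcases List.mem_cons.mp hx with rfl | hx1
    · exact hlt0
    · have hpw : (d0 :: d1).Pairwise (fun a b => tget a s ≤ tget b s) :=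
        List.Pairwise.sublist hsub (List.pairwise_cons.mp hs).2
      exact lt_of_lt_of_le hlt0 ((List.pairwise_cons.mp hpw).1 x hx1)

lemma mem_reps (s : Int) : ∀ (l : List PVItem) (v : Int),
    v ∈ reps s l ↔ ∃ x ∈ l, tget x s = v := by
  intro l
  induction l using reps.induct s with
  | case1 => intro v; simp [reps_nil]
  | case2 h t ih =>
    intro v
    rw [reps_cons]
    constructor
    · intro hv
      rcases List.mem_cons.mp hv with rfl | hv1
      · exact ⟨h, List.mem_cons_self, rfl⟩
      · rcases (ih v).mp hv1 with ⟨x, hx, hxe⟩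
        exact ⟨x, List.mem_cons_of_mem _ ((List.dropWhile_sublist _).mem hx), hxe⟩
    · rintro ⟨x, hx, rfl⟩
      rcases List.mem_cons.mp hx with rfl | hx1
      · exact List.mem_cons_self
      · by_cases hxv : tget x s = tget h s
        · rw [hxv]; exact List.mem_cons_self
        · apply List.mem_cons_of_mem
          apply (ih _).mpr
          refine ⟨x, ?_, rfl⟩
          have hsplit := List.takeWhile_append_dropWhile
            (p := fun o : PVItem => tget o s == tget h s) (l := t)
          rw [← hsplit] at hx1
          rcases List.mem_append.mp hx1 with hx2 | hx2
          · exact absurd (by simpa using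
              List.mem_takeWhile_imp (p := fun o : PVItem => tget o s == tget h s) hx2) hxv
          · exact hx2

lemma pairwise_lt_reps (s : Int) : ∀ (l : List PVItem),
    l.Pairwise (fun a b => tget a s ≤ tget b s) → (reps s l).Pairwise (· < ·) := by
  intro l
  induction l using reps.induct s with
  | case1 => intro _; simp [reps_nil]
  | case2 h t ih =>
    intro hs
    rw [reps_cons]
    refine List.pairwise_cons.mpr ⟨?_, ?_⟩
    · intro v hv
      rcases (mem_reps s _ v).mp hv with ⟨x, hx, rfl⟩
      exact dropWhile_gt s h t hs x hx
    · exact ih (List.Pairwise.sublist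
        ((List.dropWhile_sublist _).trans (List.sublist_cons_self _ _)) hs)

lemma chunkW_eq_map (s : Int) : ∀ (l : List PVItem),
    l.Pairwise (fun a b => tget a s ≤ tget b s) →
    chunkW s l = (reps s l).map (fun v => l.filter (fun o => tget o s == v)) := by
  intro l
  induction l using chunkW.induct s with
  | case1 => intro _; simp [chunkW_nil, reps_nil]
  | case2 h t ih =>
    intro hs
    rw [chunkW_cons, reps_cons]
    have htake : t.takeWhile (fun o => tget o s == tget h s)
        = t.filter (fun o => tget o s == tget h s) := by
      have hsplit := List.takeWhile_append_dropWhile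
        (p := fun o : PVItem => tget o s == tget h s) (l := t)
      conv_rhs => rw [← hsplit]
      rw [List.filter_append]
      rw [List.filter_eq_self.mpr (fun x hx =>
        List.mem_takeWhile_imp (p := fun o : PVItem => tget o s == tget h s) hx)]
      rw [List.filter_eq_nil_iff.mpr (fun x hx => by
        have := dropWhile_gt s h t hs x hx
        simp; omega)]
      simp
    rw [List.map_cons]
    congr 1
    · rw [List.filter_cons_of_pos (by simp), htake]
    · rw [ih (List.Pairwise.sublist
        ((List.dropWhile_sublist _).trans (List.sublist_cons_self _ _)) hs)]
      apply List.map_congr_left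
      intro v hv
      rcases (mem_reps s _ v).mp hv with ⟨x, hx, rfl⟩
      have hvgt : tget h s < tget x s := dropWhile_gt s h t hs x hx
      have hfh : (h :: t).filter (fun o => tget o s == tget x s)
          = t.filter (fun o => tget o s == tget x s) := by
        rw [List.filter_cons_of_neg (by simp; omega)]
      have hTD : List.filter (fun o => tget o s == tget x s) t
          = List.filter (fun o => tget o s == tget x s)
              (List.takeWhile (fun o => tget o s == tget h s) t
                ++ List.dropWhile (fun o => tget o s == tget h s) t) := by
        rw [List.takeWhile_append_dropWhile]
      have hnil : List.filter (fun o => tget o s == tget x s)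
          (List.takeWhile (fun o => tget o s == tget h s) t) = [] := by
        apply List.filter_eq_nil_iff.mpr
        intro y hy
        have hyh : tget y s = tget h s := by
          simpa using List.mem_takeWhile_imp (p := fun o : PVItem => tget o s == tget h s) hy
        simp [hyh]; omega
      rw [hfh, hTD, List.filter_append, hnil]
      simp

lemma eq_of_pairwise_lt_of_mem_iff (xs ys : List Int)
    (hx : xs.Pairwise (· < ·)) (hy : ys.Pairwise (· < ·))
    (hm : ∀ v, v ∈ xs ↔ v ∈ ys) : xs = ys := by
  have hnx : xs.Nodup := hx.imp (fun {a b} h => ne_of_lt h)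
  have hny : ys.Nodup := hy.imp (fun {a b} h => ne_of_lt h)
  have hperm : xs.Perm ys := (List.perm_ext_iff_of_nodup hnx hny).mpr hm
  exact hperm.eq_of_pairwise (fun a b _ _ hab hba => le_antisymm hab hba)
    (hx.imp (fun {a b} h => le_of_lt h)) (hy.imp (fun {a b} h => le_of_lt h))

lemma key2_injective (e : Int) : Function.Injective (key2 e) := by
  intro a b hab
  have h1 : (tget a e, oKey a) = (tget b e, oKey b) := toLex_inj.mp hab
  have h2 : oKey a = oKey b := congrArg Prod.snd h1
  unfold oKey at h2
  have h3 := toLex_inj.mp h2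
  have ha1 : a.1 = b.1 := congrArg Prod.fst h3
  have h4 := toLex_inj.mp (congrArg Prod.snd h3)
  have ha2 : a.2.1 = b.2.1 := congrArg Prod.fst h4
  have h5 := toLex_inj.mp (congrArg Prod.snd h4)
  have ha3 : a.2.2.1 = b.2.2.1 := congrArg Prod.fst h5
  have ha4 : a.2.2.2 = b.2.2.2 := congrArg Prod.snd h5
  obtain ⟨a1, a2, a3, a4⟩ := a
  obtain ⟨b1, b2, b3, b4⟩ := b
  simp_all

-- the bucket dict: keys and lookups
lemma keys_buckets (s : Int) (mylist : List PVItem) :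
    (mylist.foldl
      (fun (d : PySem.Dict Int (List PVItem)) obj =>
        d.modify (tget obj s) [] (fun b => b ++ [obj])) PySem.Dict.empty).keys
      = PySem.Set.ofList (mylist.map (fun o => tget o s)) := by
  rw [PySem.Dict.keys_foldl_modify_key mylist (fun o => tget o s) []
    (fun _ obj => fun b => b ++ [obj]) PySem.Dict.empty]
  rw [PySem.Dict.keys_empty, PySem.Set.update_nil_left]

lemma getD_buckets (s : Int) (mylist : List PVItem) (v : Int) :
    (mylist.foldl
      (fun (d : PySem.Dict Int (List PVItem)) obj =>
        d.modify (tget obj s) [] (fun b => b ++ [obj])) PySem.Dict.empty).getD v []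
      = mylist.filter (fun o => tget o s == v) := by
  have hfold : mylist.foldl
      (fun (d : PySem.Dict Int (List PVItem)) obj =>
        d.modify (tget obj s) [] (fun b => b ++ [obj])) PySem.Dict.empty
      = (mylist.map (fun o => (tget o s, o))).foldl
        (fun (d : PySem.Dict Int (List PVItem)) p =>
          d.modify p.1 [] (fun b => b ++ [p.2])) PySem.Dict.empty := by
    rw [List.foldl_map]
  rw [hfold, PySem.Dict.getD_foldl_modify_append, PySem.Dict.getD_empty]
  rw [List.filter_map]
  simp [Function.comp_def]

lemma ksorted_of_key3 (s e : Int) (l : List PVItem)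
    (h : l.Pairwise (fun a b => key3 s e a ≤ key3 s e b)) :
    l.Pairwise (fun a b => tget a s ≤ tget b s) := by
  refine h.imp ?_
  intro a b hab
  unfold key3 at hab
  rcases Prod.Lex.toLex_le_toLex.mp hab with h1 | ⟨h1, _⟩
  · exact le_of_lt h1
  · exact le_of_eq h1

lemma sorted_filter_eq (s e v : Int) (mylist : List PVItem) :
    PySem.List.sorted (mylist.filter (fun o => tget o s == v)) (fun o => key2 e o) false
      = (PySem.List.sorted mylist (fun o => key3 s e o) false).filter
          (fun o => tget o s == v) := by
  apply PySem.List.eq_of_perm_of_pairwise_le_of_injective (key := fun o => key2 e o)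
    (key2_injective e)
  · exact (PySem.List.sorted_perm _ _ _).trans
      (((PySem.List.sorted_perm mylist (fun o => key3 s e o) false).filter _).symm)
  · exact PySem.List.sorted_pairwise _ _
  · apply List.Pairwise.imp_of_mem ?_
      ((PySem.List.sorted_pairwise mylist (fun o => key3 s e o)).filter _)
    intro a b ha hb hab
    have hav : tget a s = v := by simpa using (List.mem_filter.mp ha).2
    have hbv : tget b s = v := by simpa using (List.mem_filter.mp hb).2
    unfold key3 at hab
    rcases Prod.Lex.toLex_le_toLex.mp hab with h1 | ⟨_, h2⟩
    · exact absurd h1 (by rw [hav, hbv]; exact lt_irrefl v)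
    · exact h2

lemma ks_eq_reps (s e : Int) (mylist : List PVItem) :
    PySem.List.sorted (PySem.Set.ofList (mylist.map (fun o => tget o s))) (fun x => x) false
      = reps s (PySem.List.sorted mylist (fun o => key3 s e o) false) := by
  apply eq_of_pairwise_lt_of_mem_iff
  · exact PySem.List.sorted_ofList_pairwise_lt _
  · exact pairwise_lt_reps s _
      (ksorted_of_key3 s e _ (PySem.List.sorted_pairwise mylist (fun o => key3 s e o)))
  · intro v
    rw [PySem.List.mem_sorted, PySem.Set.mem_ofList, mem_reps]
    simp [List.mem_map, (PySem.List.sorted_perm mylist (fun o => key3 s e o) false).mem_iff]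

lemma A_eq_chunkW (s e : Int) (mylist : List PVItem) (hne : mylist ≠ []) :
    group_items mylist s e = chunkW s (PySem.List.sorted mylist (fun o => key3 s e o) false) := by
  unfold group_items
  rw [if_neg hne]
  have hSne : PySem.List.sorted mylist (fun o => key3 s e o) false ≠ [] := by
    intro h0
    apply hne
    have hp := PySem.List.sorted_perm mylist (fun o => key3 s e o) false
    rw [h0] at hp
    exact hp.symm.eq_nil
  obtain ⟨h0, t0, hS0⟩ := List.exists_cons_of_ne_nil hSne
  rw [hS0]
  show (((h0 :: t0).foldl _ ([], tget h0 s, [])).2.2 ++ _) = _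
  rw [foldl_eq_chunk1 s (h0 :: t0) [] (tget h0 s) [], List.nil_append,
    chunk1_eq_chunkW s (h0 :: t0) (tget h0 s) [], chunkW_cons,
    List.takeWhile_cons, List.dropWhile_cons]
  simp

lemma B_eq_map (s e : Int) (mylist : List PVItem) :
    group_items_alt mylist s e
      = (reps s (PySem.List.sorted mylist (fun o => key3 s e o) false)).map
          (fun v => (PySem.List.sorted mylist (fun o => key3 s e o) false).filter
            (fun o => tget o s == v)) := by
  unfold group_items_alt
  simp only
  rw [keys_buckets s mylist, ks_eq_reps s e mylist]
  apply List.map_congr_left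
  intro v _
  rw [getD_buckets, sorted_filter_eq]

-- ===== VERDICT =====
theorem group_items_spec : Claim_equal_group_items := by
  intro mylist s e _hdom _hpre
  unfold Spec_group_items
  by_cases hne : mylist = []
  · subst hne
    rfl
  · rw [A_eq_chunkW s e mylist hne, B_eq_map s e mylist,
      chunkW_eq_map s _
        (ksorted_of_key3 s e _ (PySem.List.sorted_pairwise mylist (fun o => key3 s e o)))]
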